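-- pv_equiv track=rewrite | github.com/RajRudra06/Webshield-IDS | pyScripts/feature_utils.py | has_character_substitution
-- ===== SOURCE A (Python) =====
-- BRAND_KEYWORDS = [
--     'google', 'gmail', 'facebook', 'instagram', 'whatsapp', 'amazon',
--     'microsoft', 'apple', 'icloud', 'paypal', 'netflix', 'twitter',
--     'linkedin', 'youtube', 'reddit', 'tiktok', 'pinterest', 'snapchat',
--     'flipkart', 'paytm', 'phonepe', 'myntra', 'snapdeal', 'nykaa', 'meesho',
--     'icici', 'hdfc', 'sbi', 'axis', 'kotak', 'pnb', 'canara', 'bob',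
--     'swiggy', 'zomato', 'ola', 'uber', 'makemytrip', 'goibibo', 'irctc',
--     'ebay', 'etsy', 'yahoo', 'github', 'stackoverflow', 'medium', 'wordpress',
--     'shopify', 'adobe', 'salesforce', 'spotify', 'zoom', 'dropbox', 'wikipedia',
--     'chase', 'wellsfargo', 'citibank', 'bankofamerica',
--     'dhl', 'fedex', 'ups', 'usps'
-- ]
--
-- def has_character_substitution(text):
--     substitutions = {
--         'o': '0', 'O': '0',
--         'i': '1', 'I': '1', 'l': '1', 'L': '1',
--         'e': '3', 'E': '3',
--         'a': '@', 'A': '@',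
--         's': '$', 'S': '$',
--         'g': '9', 'G': '9',
--         't': '7', 'T': '7'
--     }
--     text_lower = text.lower()
--     for original, replacement in substitutions.items():
--         if replacement in text:
--             for brand in BRAND_KEYWORDS:
--                 if original.lower() in brand:
--                     pattern = brand.replace(original.lower(), replacement)
--                     if pattern in text_lower:
--                         return True
--     return False
-- ===== SOURCE B (Python) =====
-- BRAND_KEYWORDS = [
--     'google', 'gmail', 'facebook', 'instagram', 'whatsapp', 'amazon',
--     'microsoft', 'apple', 'icloud', 'paypal', 'netflix', 'twitter',
--     'linkedin', 'youtube', 'reddit', 'tiktok', 'pinterest', 'snapchat',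
--     'flipkart', 'paytm', 'phonepe', 'myntra', 'snapdeal', 'nykaa', 'meesho',
--     'icici', 'hdfc', 'sbi', 'axis', 'kotak', 'pnb', 'canara', 'bob',
--     'swiggy', 'zomato', 'ola', 'uber', 'makemytrip', 'goibibo', 'irctc',
--     'ebay', 'etsy', 'yahoo', 'github', 'stackoverflow', 'medium', 'wordpress',
--     'shopify', 'adobe', 'salesforce', 'spotify', 'zoom', 'dropbox', 'wikipedia',
--     'chase', 'wellsfargo', 'citibank', 'bankofamerica',
--     'dhl', 'fedex', 'ups', 'usps'
-- ]
--
-- # Lowercase substitution map (uppercase keys of the original are redundant: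
-- # they are lowered before use and map to the same replacement).
-- _SUBS = {'o': '0', 'i': '1', 'l': '1', 'e': '3', 'a': '@', 's': '$', 'g': '9', 't': '7'}
--
-- # Flat table of all substituted brand variants, built once at import time.
-- _PATTERNS = tuple(
--     b.replace(c, r)
--     for c, r in _SUBS.items()
--     for b in BRAND_KEYWORDS
--     if c in b
-- )
--
-- def has_character_substitution(text):
--     t = text.lower()
--     return any(t.startswith(_PATTERNS, i) for i in range(len(t)))
-- ===== Notes on version B (the rewrite author's own statement) =====
-- stated objective: alternative
-- what changed: B precomputes a flat table of substituted brand variants once at import time, then scans the lowered text position by position checking whether any pattern starts there (startswith with a tuple), instead of A's per-call nested substitution/brand loops each doing a library substring search behind a replacement-character gate.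
import Mathlib
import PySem

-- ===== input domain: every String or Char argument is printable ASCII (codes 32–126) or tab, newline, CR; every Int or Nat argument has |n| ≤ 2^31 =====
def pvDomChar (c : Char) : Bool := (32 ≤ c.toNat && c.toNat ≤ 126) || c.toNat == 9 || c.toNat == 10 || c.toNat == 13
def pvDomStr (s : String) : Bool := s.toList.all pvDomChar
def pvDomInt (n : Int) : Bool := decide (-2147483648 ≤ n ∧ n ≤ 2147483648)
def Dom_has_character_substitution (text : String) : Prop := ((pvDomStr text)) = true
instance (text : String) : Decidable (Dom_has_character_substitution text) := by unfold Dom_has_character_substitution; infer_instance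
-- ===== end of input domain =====

-- B precomputes a flat table of substituted brand variants once and scans the lowered text
-- position by position checking prefixes, instead of A's per-call nested loops with a
-- replacement-character gate and library substring searches (objective: alternative).

-- shared module-level constant of the original file
def BRAND_KEYWORDS : List String := [
  "google", "gmail", "facebook", "instagram", "whatsapp", "amazon",
  "microsoft", "apple", "icloud", "paypal", "netflix", "twitter",
  "linkedin", "youtube", "reddit", "tiktok", "pinterest", "snapchat",
  "flipkart", "paytm", "phonepe", "myntra", "snapdeal", "nykaa", "meesho",
  "icici", "hdfc", "sbi", "axis", "kotak", "pnb", "canara", "bob",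
  "swiggy", "zomato", "ola", "uber", "makemytrip", "goibibo", "irctc",
  "ebay", "etsy", "yahoo", "github", "stackoverflow", "medium", "wordpress",
  "shopify", "adobe", "salesforce", "spotify", "zoom", "dropbox", "wikipedia",
  "chase", "wellsfargo", "citibank", "bankofamerica",
  "dhl", "fedex", "ups", "usps"]

-- ===== PORT A =====
-- A's local dict 'substitutions' as an association list in insertion order (keys distinct)
def pvSubstitutionsA : List (String × String) :=
  [("o", "0"), ("O", "0"), ("i", "1"), ("I", "1"), ("l", "1"), ("L", "1"),
   ("e", "3"), ("E", "3"), ("a", "@"), ("A", "@"), ("s", "$"), ("S", "$"),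
   ("g", "9"), ("G", "9"), ("t", "7"), ("T", "7")]

-- inner 'for brand in BRAND_KEYWORDS' loop with its early return
def pvBrandLoop (textLower orig repl : String) : List String → Bool
  | [] => false
  | b :: rest =>
    if PySem.Str.isIn (PySem.Str.lower orig) b then
      if PySem.Str.isIn (PySem.Str.replace b (PySem.Str.lower orig) repl) textLower then true
      else pvBrandLoop textLower orig repl rest
    else pvBrandLoop textLower orig repl rest

-- outer 'for original, replacement in substitutions.items()' loop
def pvSubLoop (text textLower : String) : List (String × String) → Bool
  | [] => false
  | (o, r) :: rest =>
    if PySem.Str.isIn r text then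
      if pvBrandLoop textLower o r BRAND_KEYWORDS then true
      else pvSubLoop text textLower rest
    else pvSubLoop text textLower rest

def has_character_substitution (text : String) : Bool :=
  pvSubLoop text (PySem.Str.lower text) pvSubstitutionsA

-- ===== PORT B =====
-- Source B's lowercase module-level dict _SUBS as an association list in insertion order
def pvSubs : List (String × String) :=
  [("o", "0"), ("i", "1"), ("l", "1"), ("e", "3"), ("a", "@"), ("s", "$"), ("g", "9"), ("t", "7")]

-- Source B's module-level generator-built tuple _PATTERNS (kept as character lists)
def pvPatterns : List (List Char) :=
  pvSubs.flatMap (fun q =>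
    (BRAND_KEYWORDS.filter (fun b => PySem.Str.isIn q.1 b)).map
      (fun b => (PySem.Str.replace b q.1 q.2).toList))

-- 'any(t.startswith(_PATTERNS, i) for i in range(len(t)))': one pass over the positions of t,
-- each step testing whether some pattern starts at the current suffix
def pvScan (pats : List (List Char)) : List Char → Bool
  | [] => false
  | c :: rest =>
    if pats.any (fun p => PySem.Chars.startswith (c :: rest) p) then true
    else pvScan pats rest

def has_character_substitution_alt (text : String) : Bool :=
  pvScan pvPatterns (PySem.Str.lower text).toList

-- ===== PRECONDITION & SPEC =====
def Spec_has_character_substitution (text : String) (out : Bool) : Prop := out = has_character_substitution_alt text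
instance (text : String) (out : Bool) : Decidable (Spec_has_character_substitution text out) := by unfold Spec_has_character_substitution; infer_instance

-- ===== CLAIM (what is proved, stated in full; the proofs are below) =====
def Claim_equal_has_character_substitution : Prop := ∀ (text : String), Dom_has_character_substitution text → Spec_has_character_substitution text (has_character_substitution text)

-- ===== LEMMAS AND PROOFS =====

lemma pvBrandLoop_iff (tl o r : String) (l : List String) :
    pvBrandLoop tl o r l = true ↔
      ∃ b ∈ l, PySem.Str.isIn (PySem.Str.lower o) b = true ∧
        PySem.Str.isIn (PySem.Str.replace b (PySem.Str.lower o) r) tl = true := by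
  induction l with
  | nil => simp [pvBrandLoop]
  | cons b rest ih =>
    simp only [pvBrandLoop]
    split_ifs with h1 h2
    · exact iff_of_true rfl ⟨b, List.mem_cons_self .., h1, h2⟩
    · rw [ih]
      constructor
      · rintro ⟨b', hb', hg, hp⟩; exact ⟨b', List.mem_cons_of_mem _ hb', hg, hp⟩
      · rintro ⟨b', hb', hg, hp⟩
        rcases List.mem_cons.mp hb' with hb' | hb'
        · subst hb'; exact absurd hp h2
        · exact ⟨b', hb', hg, hp⟩
    · rw [ih]
      constructor
      · rintro ⟨b', hb', hg, hp⟩; exact ⟨b', List.mem_cons_of_mem _ hb', hg, hp⟩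
      · rintro ⟨b', hb', hg, hp⟩
        rcases List.mem_cons.mp hb' with hb' | hb'
        · subst hb'; exact absurd hg h1
        · exact ⟨b', hb', hg, hp⟩

lemma pvSubLoop_iff (text tl : String) (l : List (String × String)) :
    pvSubLoop text tl l = true ↔
      ∃ q ∈ l, PySem.Str.isIn q.2 text = true ∧ pvBrandLoop tl q.1 q.2 BRAND_KEYWORDS = true := by
  induction l with
  | nil => simp [pvSubLoop]
  | cons q rest ih =>
    obtain ⟨o, r⟩ := q
    simp only [pvSubLoop]
    split_ifs with h1 h2
    · exact iff_of_true rfl ⟨(o, r), List.mem_cons_self .., h1, h2⟩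
    · rw [ih]
      constructor
      · rintro ⟨q', hq', hg, hp⟩; exact ⟨q', List.mem_cons_of_mem _ hq', hg, hp⟩
      · rintro ⟨q', hq', hg, hp⟩
        rcases List.mem_cons.mp hq' with hq' | hq'
        · subst hq'; exact absurd hp h2
        · exact ⟨q', hq', hg, hp⟩
    · rw [ih]
      constructor
      · rintro ⟨q', hq', hg, hp⟩; exact ⟨q', List.mem_cons_of_mem _ hq', hg, hp⟩
      · rintro ⟨q', hq', hg, hp⟩
        rcases List.mem_cons.mp hq' with hq' | hq'
        · subst hq'; exact absurd hg h1
        · exact ⟨q', hq', hg, hp⟩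

-- B's scan finds exactly the patterns that are prefixes of some nonempty suffix
lemma pvScan_iff (pats : List (List Char)) (l : List Char) :
    pvScan pats l = true ↔ ∃ s, s <:+ l ∧ s ≠ [] ∧ ∃ p ∈ pats, p <+: s := by
  induction l with
  | nil =>
    refine iff_of_false (by simp [pvScan]) ?_
    rintro ⟨s, hs, hne, -⟩
    exact hne (List.suffix_nil.mp hs)
  | cons c rest ih =>
    simp only [pvScan]
    split_ifs with h
    · simp only [List.any_eq_true] at h
      obtain ⟨p, hp, hpre⟩ := h
      exact iff_of_true rfl ⟨c :: rest, List.suffix_refl _, by simp,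
        p, hp, (PySem.Chars.startswith_iff _ _).mp hpre⟩
    · rw [ih]
      constructor
      · rintro ⟨s, hs, hne, hp⟩
        exact ⟨s, hs.trans (List.suffix_cons c rest), hne, hp⟩
      · rintro ⟨s, hs, hne, p, hp, hpre⟩
        rcases List.suffix_cons_iff.mp hs with hs | hs
        · exfalso
          apply h
          rw [List.any_eq_true]
          exact ⟨p, hp, (PySem.Chars.startswith_iff _ _).mpr (hs ▸ hpre)⟩
        · exact ⟨s, hs, hne, p, hp, hpre⟩

-- a nonempty pattern is a prefix of a nonempty suffix iff it is an infix
lemma pv_infix_iff_prefix_of_suffix {p l : List Char} (hp : p ≠ []) :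
    (∃ s, s <:+ l ∧ s ≠ [] ∧ p <+: s) ↔ p <:+: l := by
  constructor
  · rintro ⟨s, hs, -, hpre⟩
    exact hpre.isInfix.trans hs.isInfix
  · rintro ⟨u, v, rfl⟩
    refine ⟨p ++ v, ⟨u, by simp⟩, by simp [hp], p.prefix_append v⟩

-- membership in B's pattern table
lemma pv_mem_patterns (p : List Char) :
    p ∈ pvPatterns ↔
      ∃ q ∈ pvSubs, ∃ b ∈ BRAND_KEYWORDS,
        PySem.Str.isIn q.1 b = true ∧ p = (PySem.Str.replace b q.1 q.2).toList := by
  simp only [pvPatterns, List.mem_flatMap, List.mem_map, List.mem_filter]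
  constructor
  · rintro ⟨q, hq, b, ⟨hb, hg⟩, rfl⟩; exact ⟨q, hq, b, hb, hg, rfl⟩
  · rintro ⟨q, hq, b, hb, hg, rfl⟩; exact ⟨q, hq, b, ⟨hb, hg⟩, rfl⟩

-- the 16-entry dict of A and the 8-entry lowercase dict of B generate the same (lower key, repl) pairs
lemma pv_subsA_to_B : ∀ q ∈ pvSubstitutionsA, (PySem.Str.lower q.1, q.2) ∈ pvSubs := by decide

lemma pv_subsB_to_A : ∀ q ∈ pvSubs, q ∈ pvSubstitutionsA ∧ PySem.Str.lower q.1 = q.1 := by decide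

-- every pattern is nonempty (concrete literals)
set_option maxRecDepth 8192 in
lemma pv_patterns_ne_nil : ∀ p ∈ pvPatterns, p ≠ [] := by decide

-- every pattern A tests contains its replacement character (concrete, 16 × 61 literals)
set_option maxRecDepth 8192 in
lemma pv_repl_in_pattern :
    ∀ q ∈ pvSubstitutionsA, ∀ b ∈ BRAND_KEYWORDS,
      PySem.Str.isIn (PySem.Str.lower q.1) b = true →
      PySem.Str.isIn q.2 (PySem.Str.replace b (PySem.Str.lower q.1) q.2) = true := by decide

-- every replacement string consists of characters below 'A' (digits and '@', '$')
lemma pv_repl_small : ∀ q ∈ pvSubstitutionsA, ∀ c ∈ (q.2 : String).toList, c.toNat < 65 := by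
  intro q hq
  fin_cases hq <;> simp

lemma pv_lowerChar_eq_of_small {c d : Char} (hc : c.toNat < 65)
    (h : PySem.Chars.lowerChar d = c) : d = c := by
  unfold PySem.Chars.lowerChar PySem.Chars.isupper at h
  split_ifs at h with hu
  · exfalso
    simp only [Bool.and_eq_true, decide_eq_true_eq, Char.le_def] at hu
    have h1 : 65 ≤ d.toNat := hu.1
    have h2 : d.toNat ≤ 90 := hu.2
    have hv : (d.toNat + 32).isValidChar := Or.inl (by omega)
    have ht : (Char.ofNat (d.toNat + 32)).toNat = d.toNat + 32 := by
      rw [Char.toNat_ofNat, if_pos hv]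
    rw [h] at ht
    omega
  · exact h

lemma pv_map_lower_eq_self {r seg : List Char} (hsmall : ∀ c ∈ r, c.toNat < 65)
    (h : seg.map PySem.Chars.lowerChar = r) : seg = r := by
  induction seg generalizing r with
  | nil => simpa using h.symm
  | cons a s ih =>
    cases r with
    | nil => simp at h
    | cons c rs =>
      simp only [List.map_cons, List.cons.injEq] at h
      have ha : a = c := pv_lowerChar_eq_of_small (hsmall c (by simp)) h.1
      have hs : s = rs := ih (fun x hx => hsmall x (by simp [hx])) h.2
      rw [ha, hs]

lemma pv_isIn_of_isIn_lower (r text : String) (hsmall : ∀ c ∈ r.toList, c.toNat < 65)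
    (h : PySem.Str.isIn r (PySem.Str.lower text) = true) : PySem.Str.isIn r text = true := by
  rw [PySem.Str.isIn_iff_infix] at h ⊢
  rw [show (PySem.Str.lower text).toList = text.toList.map PySem.Chars.lowerChar from
    PySem.Str.toList_lower text] at h
  obtain ⟨s, t, hst⟩ := h
  obtain ⟨sl, t', hsp, hsl, ht'⟩ := List.map_eq_append_iff.mp hst.symm
  obtain ⟨s1, seg, hsp2, hs1, hseg⟩ := List.map_eq_append_iff.mp hsl
  have hsr : seg = r.toList := pv_map_lower_eq_self hsmall hseg
  exact ⟨s1, t', by rw [hsp, hsp2, ← hsr]⟩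

-- ===== VERDICT (by name: the statement is the Claim_ definition above) =====
theorem has_character_substitution_spec : Claim_equal_has_character_substitution := by
  intro text _hdom
  unfold Spec_has_character_substitution
  rw [Bool.eq_iff_iff]
  rw [show has_character_substitution text = pvSubLoop text (PySem.Str.lower text) pvSubstitutionsA from rfl]
  rw [pvSubLoop_iff]
  rw [show has_character_substitution_alt text = pvScan pvPatterns (PySem.Str.lower text).toList from rfl]
  rw [pvScan_iff]
  constructor
  · rintro ⟨q, hq, _hgate, hbl⟩
    obtain ⟨b, hb, hg, hp⟩ := (pvBrandLoop_iff _ _ _ _).mp hbl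
    have hqB := pv_subsA_to_B q hq
    have hmem : (PySem.Str.replace b (PySem.Str.lower q.1) q.2).toList ∈ pvPatterns :=
      (pv_mem_patterns _).mpr ⟨(PySem.Str.lower q.1, q.2), hqB, b, hb, hg, rfl⟩
    obtain ⟨s, hs, hne, hpre⟩ := (pv_infix_iff_prefix_of_suffix
      (pv_patterns_ne_nil _ hmem)).mpr ((PySem.Str.isIn_iff_infix _ _).mp hp)
    exact ⟨s, hs, hne, _, hmem, hpre⟩
  · rintro ⟨s, hs, hne, p, hp, hpre⟩
    obtain ⟨q, hq, b, hb, hg, rfl⟩ := (pv_mem_patterns _).mp hp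
    obtain ⟨hqA, hlow⟩ := pv_subsB_to_A q hq
    have hinf : (PySem.Str.replace b q.1 q.2).toList <:+: (PySem.Str.lower text).toList :=
      (pv_infix_iff_prefix_of_suffix (pv_patterns_ne_nil _ hp)).mp ⟨s, hs, hne, hpre⟩
    have hin : PySem.Str.isIn (PySem.Str.replace b (PySem.Str.lower q.1) q.2)
        (PySem.Str.lower text) = true := by
      rw [hlow]; exact (PySem.Str.isIn_iff_infix _ _).mpr hinf
    refine ⟨q, hqA, ?_, (pvBrandLoop_iff _ _ _ _).mpr ⟨b, hb, by rw [hlow]; exact hg, hin⟩⟩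
    -- the gate: the replacement character occurs in text
    have h1 := pv_repl_in_pattern q hqA b hb (by rw [hlow]; exact hg)
    rw [PySem.Str.isIn_iff_infix] at h1
    rw [hlow] at hin
    rw [PySem.Str.isIn_iff_infix] at hin
    have h2 : (q.2 : String).toList <:+: (PySem.Str.lower text).toList := by
      rw [hlow] at h1; exact h1.trans hin
    exact pv_isIn_of_isIn_lower q.2 text (pv_repl_small q hqA) (PySem.Str.isIn_iff_infix _ _ |>.mpr h2)
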